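-- pv_equiv track=rewrite | github.com/khsung/BackjoonPython | Backjoon_Python/Programmers/110 Move.py | solution
-- ===== SOURCE A (Python) =====
-- def solution(s):
--     answer = []
--     for i in range(len(s)):
--         left=""
--         mid=""
--         right=""
--         for j in s[i]:
--             if j=="0":
--                 if len(right)>=2:
--                     right=right[:-2]
--                     mid+="110"
--                 else:
--                     left+=j
--             else:
--                 right+=j
--         answer.append(left+mid+right)
--
--     return answer
-- ===== SOURCE B (Python) =====
-- def solution(s):
--     answer = []
--     for t in s:
--         # pass 1: pure counting, no stack: decide which '0's become "110" blocks
--         l = 0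
--         blocks = 0
--         zeros = 0
--         flags = []
--         for ch in t:
--             if ch == "0":
--                 if l >= 2:
--                     l -= 2
--                     blocks += 1
--                     flags.append(True)
--                 else:
--                     zeros += 1
--                     flags.append(False)
--             else:
--                 l += 1
--                 flags.append(False)
--         # pass 2: right-to-left demand propagation collects the surviving characters
--         need = 0
--         tail = []
--         for ch, f in zip(reversed(t), reversed(flags)):
--             if ch == "0":
--                 if f:
--                     need += 2
--             elif need > 0:
--                 need -= 1
--             else:
--                 tail.append(ch)
--         answer.append("0" * zeros + "110" * blocks + "".join(reversed(tail)))
--     return answer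
-- ===== Notes on version B (the rewrite author's own statement) =====
-- stated objective: alternative
-- what changed: Replaces A's single-pass three-string stack simulation (with right[:-2] slicing) by two staged passes: a forward pure-counting pass that only marks which zeros become '110' blocks (no stack, no character storage), then a right-to-left demand-propagation pass that collects the surviving characters; the output is assembled once by replication and join.
import Mathlib
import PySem

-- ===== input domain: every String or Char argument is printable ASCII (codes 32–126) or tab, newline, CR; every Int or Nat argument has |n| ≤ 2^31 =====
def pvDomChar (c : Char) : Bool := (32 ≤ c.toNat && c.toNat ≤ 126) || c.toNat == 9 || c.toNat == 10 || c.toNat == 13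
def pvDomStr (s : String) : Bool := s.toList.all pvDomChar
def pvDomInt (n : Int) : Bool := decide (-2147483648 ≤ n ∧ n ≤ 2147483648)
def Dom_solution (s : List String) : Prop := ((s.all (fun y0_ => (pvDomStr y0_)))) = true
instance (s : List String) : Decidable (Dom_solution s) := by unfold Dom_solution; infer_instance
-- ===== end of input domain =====

-- B replaces A's stack simulation by two staged passes: a forward counting pass marking which
-- zeros become "110" blocks, then a backward demand-propagation pass collecting the survivors.

-- ===== PORT A =====
-- inner-loop body of A: state (left, mid, right) as character lists
def solStepA (st : List Char × List Char × List Char) (j : Char) :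
    List Char × List Char × List Char :=
  let (l, m, r) := st
  if j = '0' then
    if r.length ≥ 2 then
      (l, m ++ ['1', '1', '0'], PySem.List.slice r none (some (-2)))  -- right = right[:-2]
    else
      (l ++ [j], m, r)
  else
    (l, m, r ++ [j])

def solution (s : List String) : List String :=
  s.map (fun t =>
    let (l, m, r) := t.toList.foldl solStepA ([], [], [])
    String.ofList (l ++ m ++ r))

-- ===== PORT B =====
-- pass-1 body: state (l, blocks, zeros, flags); flags records, per char, whether it is a block-forming '0'
def solStep1 (st : Nat × Nat × Nat × List Bool) (ch : Char) : Nat × Nat × Nat × List Bool :=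
  let (l, b, z, fl) := st
  if ch = '0' then
    if l ≥ 2 then (l - 2, b + 1, z, fl ++ [true])
    else (l, b, z + 1, fl ++ [false])
  else (l + 1, b, z, fl ++ [false])

-- pass-2 body (iterating right-to-left): state (need, tail); tail is appended, reversed at the end
def solStep2 (st : Nat × List Char) (p : Char × Bool) : Nat × List Char :=
  let (need, tail) := st
  if p.1 = '0' then
    (if p.2 then need + 2 else need, tail)
  else if need > 0 then (need - 1, tail)
  else (need, tail ++ [p.1])

def solution_alt (s : List String) : List String :=
  s.map (fun t =>
    let cs := t.toList
    let (_, b, z, fl) := cs.foldl solStep1 (0, 0, 0, [])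
    -- Python iterates zip(reversed(t), reversed(flags)); same pairs as the reversed zip
    let (_, tail) := ((cs.zip fl).reverse).foldl solStep2 (0, [])
    String.ofList (List.replicate z '0' ++ (List.replicate b ['1', '1', '0']).flatten ++ tail.reverse))

-- ===== PRECONDITION & SPEC =====
def Spec_solution (s : List String) (out : List String) : Prop := out = solution_alt s
instance (s : List String) (out : List String) : Decidable (Spec_solution s out) := by unfold Spec_solution; infer_instance

-- ===== CLAIM (what is proved, stated in full; the proofs are below) =====
def Claim_equal_solution : Prop := ∀ (s : List String), Dom_solution s → Spec_solution s (solution s)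

-- ===== LEMMAS AND PROOFS =====

-- scalar recursions describing pass 1 as functions of the entering counter l
def solFlags (l : Nat) : List Char → List Bool
  | [] => []
  | c :: cs =>
    if c = '0' then
      if l ≥ 2 then true :: solFlags (l - 2) cs else false :: solFlags l cs
    else false :: solFlags (l + 1) cs

def solB (l : Nat) : List Char → Nat
  | [] => 0
  | c :: cs =>
    if c = '0' then
      if l ≥ 2 then solB (l - 2) cs + 1 else solB l cs
    else solB (l + 1) cs

def solZ (l : Nat) : List Char → Nat
  | [] => 0
  | c :: cs =>
    if c = '0' then
      if l ≥ 2 then solZ (l - 2) cs else solZ l cs + 1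
    else solZ (l + 1) cs

def solL (l : Nat) : List Char → Nat
  | [] => l
  | c :: cs =>
    if c = '0' then
      if l ≥ 2 then solL (l - 2) cs else solL l cs
    else solL (l + 1) cs

-- pass 2 as a foldr (right-to-left processing)
def solP2 (xs : List (Char × Bool)) : Nat × List Char :=
  xs.foldr (fun p st => solStep2 st p) (0, [])

theorem solP2_cons (p : Char × Bool) (xs : List (Char × Bool)) :
    solP2 (p :: xs) = solStep2 (solP2 xs) p := rfl

theorem solStepA_zero_big (L M r : List Char) (h : 2 ≤ r.length) :
    solStepA (L, M, r) '0' = (L, M ++ ['1', '1', '0'], r.take (r.length - 2)) := by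
  simp [solStepA, h, PySem.List.slice_to_neg_ofNat r 2 (by omega)]

theorem solStepA_zero_small (L M r : List Char) (h : ¬ 2 ≤ r.length) :
    solStepA (L, M, r) '0' = (L ++ ['0'], M, r) := by
  simp [solStepA]; omega

theorem solStepA_push (L M r : List Char) (c : Char) (h : ¬ c = '0') :
    solStepA (L, M, r) c = (L, M, r ++ [c]) := by
  simp [solStepA, h]

theorem solStep1_fold (ds : List Char) (l b z : Nat) (fl : List Bool) :
    ds.foldl solStep1 (l, b, z, fl) =
      (solL l ds, b + solB l ds, z + solZ l ds, fl ++ solFlags l ds) := by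
  induction ds generalizing l b z fl with
  | nil => simp [solL, solB, solZ, solFlags]
  | cons c cs ih =>
    by_cases hc : c = '0'
    · by_cases hl : l ≥ 2
      · simp [solStep1, solL, solB, solZ, solFlags, hc, hl, ih]; omega
      · simp [solStep1, solL, solB, solZ, solFlags, hc, hl, ih]; omega
    · simp [solStep1, solL, solB, solZ, solFlags, hc, ih]

-- MAIN invariant: A's fold from stack r is described by pass 1's counts and pass 2's survivors.
theorem solMain (ds : List Char) (L M r : List Char) :
    (solP2 (ds.zip (solFlags r.length ds))).1 ≤ r.length ∧
    ds.foldl solStepA (L, M, r) =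
      (L ++ List.replicate (solZ r.length ds) '0',
       M ++ (List.replicate (solB r.length ds) ['1', '1', '0']).flatten,
       r.take (r.length - (solP2 (ds.zip (solFlags r.length ds))).1) ++
         (solP2 (ds.zip (solFlags r.length ds))).2.reverse) := by
  induction ds generalizing L M r with
  | nil => simp [solP2, solZ, solB, solFlags]
  | cons c cs ih =>
    by_cases hc : c = '0'
    · subst hc
      by_cases hl : 2 ≤ r.length
      · -- block-forming zero
        have hfl : solFlags r.length ('0' :: cs) = true :: solFlags (r.length - 2) cs := by
          simp [solFlags, hl]
        have hzv : solZ r.length ('0' :: cs) = solZ (r.length - 2) cs := by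
          simp [solZ, hl]
        have hbv : solB r.length ('0' :: cs) = solB (r.length - 2) cs + 1 := by
          simp [solB, hl]
        rcases hP : solP2 (cs.zip (solFlags (r.length - 2) cs)) with ⟨n, tl⟩
        have hp2 : solP2 (('0' :: cs).zip (solFlags r.length ('0' :: cs))) = (n + 2, tl) := by
          rw [hfl, List.zip_cons_cons, solP2_cons, hP]; simp [solStep2]
        obtain ⟨hneed, hfold⟩ := ih L (M ++ ['1', '1', '0']) (r.take (r.length - 2))
        have hlen : (r.take (r.length - 2)).length = r.length - 2 := by
          rw [List.length_take]; omega
        rw [hlen, hP] at hneed hfold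
        refine ⟨by rw [hp2]; omega, ?_⟩
        rw [List.foldl_cons, solStepA_zero_big L M r hl, hfold, hzv, hbv, hp2]
        have hidx : r.length - 2 - n = r.length - (n + 2) := by omega
        simp [List.replicate_succ, List.append_assoc, List.take_take, hidx,
          min_eq_left (show r.length - (n + 2) ≤ r.length - 2 by omega)]
      · -- dead zero
        have hfl : solFlags r.length ('0' :: cs) = false :: solFlags r.length cs := by
          simp [solFlags, hl]
        have hzv : solZ r.length ('0' :: cs) = solZ r.length cs + 1 := by
          simp [solZ, hl]
        have hbv : solB r.length ('0' :: cs) = solB r.length cs := by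
          simp [solB, hl]
        rcases hP : solP2 (cs.zip (solFlags r.length cs)) with ⟨n, tl⟩
        have hp2 : solP2 (('0' :: cs).zip (solFlags r.length ('0' :: cs))) = (n, tl) := by
          rw [hfl, List.zip_cons_cons, solP2_cons, hP]; simp [solStep2]
        obtain ⟨hneed, hfold⟩ := ih (L ++ ['0']) M r
        rw [hP] at hneed hfold
        refine ⟨by rw [hp2]; exact hneed, ?_⟩
        rw [List.foldl_cons, solStepA_zero_small L M r hl, hfold, hzv, hbv, hp2]
        simp [List.replicate_succ, List.append_assoc]
    · -- non-'0' char: pushed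
      have hfl : solFlags r.length (c :: cs) = false :: solFlags (r.length + 1) cs := by
        simp [solFlags, hc]
      have hzv : solZ r.length (c :: cs) = solZ (r.length + 1) cs := by
        simp [solZ, hc]
      have hbv : solB r.length (c :: cs) = solB (r.length + 1) cs := by
        simp [solB, hc]
      rcases hP : solP2 (cs.zip (solFlags (r.length + 1) cs)) with ⟨n, tl⟩
      obtain ⟨hneed, hfold⟩ := ih L M (r ++ [c])
      have hlen : (r ++ [c]).length = r.length + 1 := by simp
      rw [hlen, hP] at hneed hfold
      by_cases hn : 0 < n
      · have hp2 : solP2 ((c :: cs).zip (solFlags r.length (c :: cs))) = (n - 1, tl) := by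
          rw [hfl, List.zip_cons_cons, solP2_cons, hP]; simp [solStep2, hc, hn]
        refine ⟨by rw [hp2]; simp at hneed ⊢; omega, ?_⟩
        rw [List.foldl_cons, solStepA_push L M r c hc, hfold, hzv, hbv, hp2]
        have h1 : r.length + 1 - n ≤ r.length := by omega
        rw [List.take_append_of_le_length h1]
        have hidx : r.length + 1 - n = r.length - (n - 1) := by omega
        simp [hidx]
      · have hn0 : n = 0 := by omega
        subst hn0
        have hp2 : solP2 ((c :: cs).zip (solFlags r.length (c :: cs))) = (0, tl ++ [c]) := by
          rw [hfl, List.zip_cons_cons, solP2_cons, hP]; simp [solStep2, hc]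
        refine ⟨by rw [hp2]; simp, ?_⟩
        rw [List.foldl_cons, solStepA_push L M r c hc, hfold, hzv, hbv, hp2]
        rw [List.take_of_length_le (by simp)]
        simp

-- ===== VERDICT (by name: the statement is the Claim_ definition above) =====
theorem solution_spec : Claim_equal_solution := by
  intro s _
  unfold Spec_solution solution solution_alt
  refine List.map_congr_left (fun t _ => ?_)
  obtain ⟨hneed, hfold⟩ := solMain t.toList [] [] []
  simp only [List.length_nil] at hneed hfold
  rcases hP : solP2 (t.toList.zip (solFlags 0 t.toList)) with ⟨n, tl⟩
  rw [hP] at hneed hfold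
  simp only at hneed
  have hn0 : n = 0 := by omega
  subst hn0
  rw [hfold]
  have hfr : ((t.toList.zip (solFlags 0 t.toList)).foldr (fun x y => solStep2 y x) (0, []))
      = (0, tl) := hP
  simp [solStep1_fold, List.foldl_reverse, hfr]
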